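-- pv_equiv track=rewrite | github.com/jramaswami/Binary_Search_Python | maximize_rook_square_values.py | solve
-- ===== SOURCE A (Python) =====
-- from collections import namedtuple
--
-- Tile = namedtuple('Tile', ['val', 'row', 'col'])
--
-- def flatten_board(board):
--     """Return flattened board."""
--     flat = []
--     for r, row in enumerate(board):
--         for c, val in enumerate(row):
--             flat.append(Tile(val, r, c))
--     return flat
--
-- def solve(board):
--     soln = 0
--     flat = flatten_board(board)
--     flat.sort(reverse=True)
--     for i, a in enumerate(flat):
--         # If twice the current value is not enough to beat the solution then:
--         # (1) The current value has already been paired with with a greater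
--         #     value
--         # (2) The current value must pair with a equal or smaller value, 4
--         #     which will not produce a greater solution
--         if 2 * a.val <= soln:
--             break
--         for j, b in enumerate(flat):
--             if a.row != b.row and a.col != b.col:
--                 soln = max(soln, a.val + b.val)
--                 break
--     return soln
-- ===== SOURCE B (Python) =====
-- def solve(board):
--     # Exhaustive scan: max(0, best sum of two cells in distinct rows and columns).
--     cells = [(v, r, c) for r, row in enumerate(board) for c, v in enumerate(row)]
--     sums = [a + b
--             for (a, r1, c1) in cells
--             for (b, r2, c2) in cells
--             if r1 != r2 and c1 != c2]
--     best = 0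
--     for s in sums:
--         best = max(best, s)
--     return best
-- ===== Notes on version B (the rewrite author's own statement) =====
-- stated objective: simpler
-- what changed: B drops A's descending sort, pruning break and greedy first-compatible inner scan, and instead takes the plain maximum (clamped at 0) over all pairs of cells in distinct rows and columns.
import Mathlib
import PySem

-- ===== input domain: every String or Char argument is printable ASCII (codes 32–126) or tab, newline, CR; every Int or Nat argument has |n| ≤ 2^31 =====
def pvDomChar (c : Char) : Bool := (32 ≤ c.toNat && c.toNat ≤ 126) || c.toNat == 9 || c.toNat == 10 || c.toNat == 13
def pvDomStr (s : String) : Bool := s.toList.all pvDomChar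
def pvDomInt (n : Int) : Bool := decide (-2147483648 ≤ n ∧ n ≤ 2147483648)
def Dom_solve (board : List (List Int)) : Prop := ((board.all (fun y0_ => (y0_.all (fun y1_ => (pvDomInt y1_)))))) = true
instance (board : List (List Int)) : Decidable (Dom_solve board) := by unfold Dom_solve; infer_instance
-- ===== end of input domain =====

-- B replaces A's sort + pruning + greedy first-compatible scan by a plain clamped maximum
-- over all valid pairs (objective: simpler; not faster).

-- ===== PORT A =====
-- tiles are (val, row, col), as in the namedtuple Tile
def pvFlatten (board : List (List Int)) : List (Int × Int × Int) :=
  (PySem.List.enumerate board).foldl (fun flat rrow =>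
    (PySem.List.enumerate rrow.2).foldl (fun flat2 cv => flat2 ++ [(cv.2, rrow.1, cv.1)]) flat) []

-- Python's tuple comparison for flat.sort(reverse=True): lexicographic on (val, row, col)
def pvKey (t : Int × Int × Int) : Lex (Int × Lex (Int × Int)) := toLex (t.1, toLex (t.2.1, t.2.2))

-- the inner 'for j, b in enumerate(flat): if compatible: update; break'
def pvInner (flat : List (Int × Int × Int)) (a : Int × Int × Int) (soln : Int) : Int :=
  match flat.find? (fun b => (a.2.1 != b.2.1) && (a.2.2 != b.2.2)) with
  | some b => max soln (a.1 + b.1)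
  | none => soln

-- the outer loop with its pruning break
def pvOuter (flat : List (Int × Int × Int)) : List (Int × Int × Int) → Int → Int
  | [], soln => soln
  | a :: rest, soln =>
      if 2 * a.1 ≤ soln then soln else pvOuter flat rest (pvInner flat a soln)

def solve (board : List (List Int)) : Int :=
  let flat := PySem.List.sorted (pvFlatten board) pvKey true
  pvOuter flat flat 0

-- ===== PORT B =====
def pvCells (board : List (List Int)) : List (Int × Int × Int) :=
  (PySem.List.enumerate board).flatMap (fun rrow =>
    (PySem.List.enumerate rrow.2).map (fun cv => (cv.2, rrow.1, cv.1)))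

def pvSums (cells : List (Int × Int × Int)) : List Int :=
  cells.flatMap (fun a =>
    cells.filterMap (fun b =>
      if a.2.1 ≠ b.2.1 ∧ a.2.2 ≠ b.2.2 then some (a.1 + b.1) else none))

def solve_alt (board : List (List Int)) : Int :=
  (pvSums (pvCells board)).foldl max 0

-- ===== PRECONDITION & SPEC =====
def Spec_solve (board : List (List Int)) (out : Int) : Prop := out = solve_alt board
instance (board : List (List Int)) (out : Int) : Decidable (Spec_solve board out) := by unfold Spec_solve; infer_instance

-- ===== CLAIM (what is proved, stated in full; the proofs are below) =====
def Claim_equal_solve : Prop := ∀ (board : List (List Int)), Dom_solve board → Spec_solve board (solve board)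

-- ===== LEMMAS AND PROOFS =====

-- A's append-loop flatten builds the same list as B's comprehension
lemma pvFlatten_eq_cells (board : List (List Int)) : pvFlatten board = pvCells board := by
  unfold pvFlatten pvCells
  simp [← List.flatMap_def, ← List.map_eq_flatMap]

-- membership in pvSums = being the sum of a valid pair of cells
lemma mem_pvSums {cells : List (Int × Int × Int)} {x : Int} :
    x ∈ pvSums cells ↔ ∃ a ∈ cells, ∃ b ∈ cells,
      a.2.1 ≠ b.2.1 ∧ a.2.2 ≠ b.2.2 ∧ x = a.1 + b.1 := by
  unfold pvSums
  simp only [List.mem_flatMap, List.mem_filterMap, Option.ite_none_right_eq_some,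
    Option.some.injEq]
  constructor
  · rintro ⟨a, ha, b, hb, ⟨h1, h2⟩, rfl⟩
    exact ⟨a, ha, b, hb, h1, h2, rfl⟩
  · rintro ⟨a, ha, b, hb, h1, h2, rfl⟩
    exact ⟨a, ha, b, hb, ⟨h1, h2⟩, rfl⟩

-- every valid pair sum is ≤ B's answer, and 0 ≤ B's answer
lemma le_solve_alt {board : List (List Int)} {x : Int} (hx : x ∈ pvSums (pvCells board)) :
    x ≤ solve_alt board := by
  unfold solve_alt
  exact (PySem.List.le_foldl_max (pvSums (pvCells board)) 0).2 x hx

lemma solve_alt_nonneg (board : List (List Int)) : 0 ≤ solve_alt board := by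
  unfold solve_alt
  exact (PySem.List.le_foldl_max (pvSums (pvCells board)) 0).1

lemma solve_alt_cases (board : List (List Int)) :
    solve_alt board = 0 ∨ solve_alt board ∈ pvSums (pvCells board) := by
  unfold solve_alt
  exact PySem.List.foldl_max_mem (pvSums (pvCells board)) 0

-- the state only grows through the inner loop
lemma pvInner_ge (flat : List (Int × Int × Int)) (a : Int × Int × Int) (s : Int) :
    s ≤ pvInner flat a s := by
  unfold pvInner
  cases h : flat.find? (fun b => (a.2.1 != b.2.1) && (a.2.2 != b.2.2)) with
  | none => exact le_refl s
  | some b => exact le_max_left _ _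

-- the inner loop only updates with a valid pair sum
lemma pvInner_le {flat : List (Int × Int × Int)} {a : Int × Int × Int} {s m : Int}
    (hs : s ≤ m)
    (h : ∀ b ∈ flat, a.2.1 ≠ b.2.1 → a.2.2 ≠ b.2.2 → a.1 + b.1 ≤ m) :
    pvInner flat a s ≤ m := by
  unfold pvInner
  cases hf : flat.find? (fun b => (a.2.1 != b.2.1) && (a.2.2 != b.2.2)) with
  | none => exact hs
  | some b =>
      have hmem := List.find?_some hf
      simp only [Bool.and_eq_true, bne_iff_ne] at hmem
      exact max_le hs (h b (List.mem_of_find?_eq_some hf) hmem.1 hmem.2)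

lemma pvOuter_mono (flat : List (Int × Int × Int)) :
    ∀ (rest : List (Int × Int × Int)) (s : Int), s ≤ pvOuter flat rest s := by
  intro rest
  induction rest with
  | nil => intro s; exact le_refl s
  | cons a t ih =>
      intro s
      unfold pvOuter
      split
      · exact le_refl s
      · exact le_trans (pvInner_ge flat a s) (ih _)

-- upper bound: the loop's state never exceeds B's answer
lemma pvOuter_le {board : List (List Int)} {flat : List (Int × Int × Int)}
    (hsub : ∀ b ∈ flat, b ∈ pvCells board) :
    ∀ (rest : List (Int × Int × Int)) (s : Int),
      (∀ a ∈ rest, a ∈ pvCells board) → s ≤ solve_alt board →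
      pvOuter flat rest s ≤ solve_alt board := by
  intro rest
  induction rest with
  | nil => intro s _ hs; exact hs
  | cons a t ih =>
      intro s hmem hs
      unfold pvOuter
      split
      · exact hs
      · refine ih _ (fun x hx => hmem x (List.mem_cons_of_mem a hx)) ?_
        refine pvInner_le hs (fun b hb h1 h2 => ?_)
        refine le_solve_alt (mem_pvSums.mpr ?_)
        exact ⟨a, hmem a (List.mem_cons_self), b, hsub b hb, h1, h2, rfl⟩

-- in a val-descending list, the first compatible element is at least as large as any compatible one
lemma find?_val_ge {a : Int × Int × Int} :
    ∀ {flat : List (Int × Int × Int)},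
      flat.Pairwise (fun u v => v.1 ≤ u.1) →
      ∀ {y b : Int × Int × Int}, y ∈ flat →
      ((a.2.1 != y.2.1) && (a.2.2 != y.2.2)) = true →
      flat.find? (fun b => (a.2.1 != b.2.1) && (a.2.2 != b.2.2)) = some b →
      y.1 ≤ b.1 := by
  intro flat
  induction flat with
  | nil => intro _ y b hy; simp at hy
  | cons z t ih =>
      intro hpw y b hy hyp hf
      rw [List.find?_cons] at hf
      split at hf
      · cases Option.some_inj.mp hf
        rcases List.mem_cons.mp hy with rfl | hyt
        · exact le_refl _
        · exact (List.pairwise_cons.mp hpw).1 y hyt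
      · rcases List.mem_cons.mp hy with rfl | hyt
        · simp_all
        · exact ih (List.pairwise_cons.mp hpw).2 hyt hyp hf

-- lower bound: for any valid pair (x, y) with y.1 ≤ x.1 and x still to be processed,
-- the loop's final state is at least x.1 + y.1
lemma pvOuter_ge {flat : List (Int × Int × Int)}
    (hpwL : flat.Pairwise (fun u v => v.1 ≤ u.1))
    {x y : Int × Int × Int} (hyL : y ∈ flat)
    (h1 : x.2.1 ≠ y.2.1) (h2 : x.2.2 ≠ y.2.2) (hvy : y.1 ≤ x.1) :
    ∀ (rest : List (Int × Int × Int)) (s : Int),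
      rest.Pairwise (fun u v => v.1 ≤ u.1) → x ∈ rest →
      x.1 + y.1 ≤ pvOuter flat rest s := by
  intro rest
  induction rest with
  | nil => intro s _ hx; simp at hx
  | cons a t ih =>
      intro s hpw hx
      unfold pvOuter
      split
      · rename_i hbreak
        have hax : x.1 ≤ a.1 := by
          rcases List.mem_cons.mp hx with rfl | hxt
          · exact le_refl _
          · exact (List.pairwise_cons.mp hpw).1 x hxt
        omega
      · rcases List.mem_cons.mp hx with rfl | hxt
        · -- a = x: the inner loop finds a compatible partner at least as good as y
          have hyp : ((x.2.1 != y.2.1) && (x.2.2 != y.2.2)) = true := by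
            simp only [Bool.and_eq_true, bne_iff_ne]
            exact ⟨h1, h2⟩
          have hex : (flat.find? (fun b => (x.2.1 != b.2.1) && (x.2.2 != b.2.2))).isSome := by
            rw [List.find?_isSome]
            exact ⟨y, hyL, hyp⟩
          rcases Option.isSome_iff_exists.mp hex with ⟨b, hb⟩
          have hby : y.1 ≤ b.1 := find?_val_ge hpwL hyL hyp hb
          refine le_trans ?_ (pvOuter_mono flat t _)
          unfold pvInner
          rw [hb]
          have : x.1 + y.1 ≤ x.1 + b.1 := by omega
          exact le_trans this (le_max_right _ _)
        · exact ih _ (List.pairwise_cons.mp hpw).2 hxt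

-- the sorted list is val-descending
lemma sorted_val_desc (xs : List (Int × Int × Int)) :
    (PySem.List.sorted xs pvKey true).Pairwise (fun u v => v.1 ≤ u.1) := by
  refine (PySem.List.sorted_pairwise_rev xs pvKey).imp ?_
  intro u v h
  unfold pvKey at h
  rcases Prod.Lex.le_iff.mp h with hlt | ⟨heq, _⟩
  · exact le_of_lt hlt
  · exact le_of_eq heq

-- ===== VERDICT (by name: the statement is the Claim_ definition above) =====
theorem solve_spec : Claim_equal_solve := by
  intro board _
  unfold Spec_solve solve
  have hperm : (PySem.List.sorted (pvFlatten board) pvKey true).Perm (pvCells board) := by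
    rw [← pvFlatten_eq_cells]
    exact PySem.List.sorted_perm _ _ _
  set L := PySem.List.sorted (pvFlatten board) pvKey true with hL
  have hpwL : L.Pairwise (fun u v => v.1 ≤ u.1) := sorted_val_desc _
  have hsub : ∀ b ∈ L, b ∈ pvCells board := fun b hb => hperm.mem_iff.mp hb
  refine le_antisymm ?_ ?_
  · exact pvOuter_le hsub L 0 hsub (solve_alt_nonneg board)
  · rcases solve_alt_cases board with h0 | hmem
    · rw [h0]; exact pvOuter_mono L L 0
    · rcases mem_pvSums.mp hmem with ⟨a, ha, b, hb, h1, h2, hsum⟩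
      have haL : a ∈ L := hperm.mem_iff.mpr ha
      have hbL : b ∈ L := hperm.mem_iff.mpr hb
      rcases le_total b.1 a.1 with hle | hle
      · rw [hsum]
        exact pvOuter_ge hpwL hbL h1 h2 hle L 0 hpwL haL
      · rw [hsum, Int.add_comm]
        exact pvOuter_ge hpwL haL (Ne.symm h1) (Ne.symm h2) hle L 0 hpwL hbL
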